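-- pv_equiv track=rewrite | github.com/darkSteal1152/CSE-5311-Hands-On-6 | non_quicksort.py | unsort_array
-- ===== SOURCE A (Python) =====
-- def unsort_array(arr):
--     if len(arr) <= 1:
--         return arr
--
--     mid_index = len(arr) // 2
--     middle = arr[mid_index]
--     arr = arr[:mid_index] + arr[mid_index+1:]
--
--     min_subarray = arr[:len(arr) // 2]  # First half
--     max_subarray = arr[len(arr) // 2:]  # Second half
--
--     min_result = unsort_array(min_subarray)
--     max_result = unsort_array(max_subarray)
--
--     return min_result + max_result + [middle]
-- ===== SOURCE B (Python) =====
-- def unsort_array(arr):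
--     out = []
--     stack = [arr]
--     while stack:
--         seg = stack.pop()
--         if len(seg) <= 1:
--             out.extend(seg)
--             continue
--         m = len(seg) // 2
--         middle = seg[m]
--         rest = seg[:m] + seg[m+1:]
--         h = len(rest) // 2
--         stack.append([middle])
--         stack.append(rest[h:])
--         stack.append(rest[:h])
--     return out
-- ===== Notes on version B (the rewrite author's own statement) =====
-- stated objective: alternative
-- what changed: Replaces A's recursion, which builds the result by concatenating the two recursive results plus the middle element, with an explicit work-stack loop that pops segments and appends directly into a single output accumulator.
import Mathlib
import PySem

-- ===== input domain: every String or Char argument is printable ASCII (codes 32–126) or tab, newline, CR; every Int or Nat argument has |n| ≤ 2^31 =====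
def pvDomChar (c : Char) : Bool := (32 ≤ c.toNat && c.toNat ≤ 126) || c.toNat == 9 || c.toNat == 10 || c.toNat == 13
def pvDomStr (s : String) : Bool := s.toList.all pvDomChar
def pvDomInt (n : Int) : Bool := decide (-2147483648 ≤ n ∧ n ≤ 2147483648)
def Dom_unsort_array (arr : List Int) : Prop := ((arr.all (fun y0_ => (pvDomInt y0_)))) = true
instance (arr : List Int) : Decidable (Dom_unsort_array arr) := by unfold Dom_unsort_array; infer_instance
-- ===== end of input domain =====

-- B replaces A's recursion (which concatenates recursive results) by an explicit work stack
-- and a single output accumulator appended to in order; objective: alternative decomposition.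

-- length facts about the slice expressions shared by both ports (cited in their decreasing_by)
theorem pvLenTakeHalf (xs : List Int) :
    (PySem.List.slice xs none (some (PySem.Int.floordiv (xs.length : Int) 2))).length = xs.length / 2 := by
  have h2 : PySem.Int.floordiv (xs.length : Int) 2 = ((xs.length / 2 : Nat) : Int) := by
    exact_mod_cast PySem.Int.floordiv_natCast xs.length 2
  rw [h2, PySem.List.slice_to_natCast]
  simp [List.length_take]
  omega

theorem pvLenDropHalf (xs : List Int) :
    (PySem.List.slice xs (some (PySem.Int.floordiv (xs.length : Int) 2)) none).length = xs.length - xs.length / 2 := by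
  have h2 : PySem.Int.floordiv (xs.length : Int) 2 = ((xs.length / 2 : Nat) : Int) := by
    exact_mod_cast PySem.Int.floordiv_natCast xs.length 2
  rw [h2, PySem.List.slice_from_natCast]
  simp [List.length_drop]

theorem pvLenRest (xs : List Int) (h : 2 ≤ xs.length) :
    (PySem.List.slice xs none (some (PySem.Int.floordiv (xs.length : Int) 2)) ++
      PySem.List.slice xs (some (PySem.Int.floordiv (xs.length : Int) 2 + 1)) none).length
      = xs.length - 1 := by
  have h2 : PySem.Int.floordiv (xs.length : Int) 2 = ((xs.length / 2 : Nat) : Int) := by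
    exact_mod_cast PySem.Int.floordiv_natCast xs.length 2
  have h3 : PySem.Int.floordiv (xs.length : Int) 2 + 1 = ((xs.length / 2 + 1 : Nat) : Int) := by
    rw [h2]; push_cast; ring
  rw [h3, h2, PySem.List.slice_to_natCast, PySem.List.slice_from_natCast]
  simp [List.length_take, List.length_drop]
  omega

-- ===== PORT A =====
def unsort_array (arr : List Int) : List Int :=
  if arr.length ≤ 1 then arr
  else
    let mid_index := PySem.Int.floordiv (arr.length : Int) 2
    let middle := PySem.List.pyGetD arr mid_index 0
    let arr2 := PySem.List.slice arr none (some mid_index) ++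
                PySem.List.slice arr (some (mid_index + 1)) none
    let min_subarray := PySem.List.slice arr2 none (some (PySem.Int.floordiv (arr2.length : Int) 2))
    let max_subarray := PySem.List.slice arr2 (some (PySem.Int.floordiv (arr2.length : Int) 2)) none
    unsort_array min_subarray ++ unsort_array max_subarray ++ [middle]
termination_by arr.length
decreasing_by
  · have hr := pvLenRest arr (by omega)
    have := pvLenTakeHalf (PySem.List.slice arr none (some (PySem.Int.floordiv (arr.length : Int) 2)) ++
                PySem.List.slice arr (some (PySem.Int.floordiv (arr.length : Int) 2 + 1)) none)
    omega
  · have hr := pvLenRest arr (by omega)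
    have := pvLenDropHalf (PySem.List.slice arr none (some (PySem.Int.floordiv (arr.length : Int) 2)) ++
                PySem.List.slice arr (some (PySem.Int.floordiv (arr.length : Int) 2 + 1)) none)
    omega

theorem pvMeasureLt (L R seg : List Int) (mid : Int) (stk : List (List Int))
    (hL : L.length = (seg.length - 1) / 2)
    (hR : R.length = seg.length - 1 - (seg.length - 1) / 2)
    (h2 : 2 ≤ seg.length) :
    2 * ((L :: R :: [mid] :: stk).map (fun s => s.length * s.length)).sum + (L :: R :: [mid] :: stk).length <
      2 * ((seg :: stk).map (fun s => s.length * s.length)).sum + (seg :: stk).length := by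
  simp only [List.map_cons, List.sum_cons, List.length_cons, List.length_nil, Nat.zero_add, Nat.one_mul, hL, hR]
  set p := (seg.length - 1) / 2 with hp
  set q := seg.length - 1 - p with hq
  have hpq : p + q + 1 = seg.length := by omega
  have hsq : seg.length * seg.length = (p + q + 1) * (p + q + 1) := by rw [hpq]
  have h1 : 1 ≤ p + q := by omega
  nlinarith [hsq, h1, Nat.zero_le (p * q)]

-- ===== PORT B =====
-- the while-loop of Source B: stack of pending segments (top first), out the accumulated output
def pvLoop : List (List Int) → List Int → List Int
  | [], out => out
  | seg :: stack, out =>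
    if seg.length ≤ 1 then pvLoop stack (out ++ seg)
    else
      let m := PySem.Int.floordiv (seg.length : Int) 2
      let middle := PySem.List.pyGetD seg m 0
      let rest := PySem.List.slice seg none (some m) ++ PySem.List.slice seg (some (m + 1)) none
      let h := PySem.Int.floordiv (rest.length : Int) 2
      pvLoop (PySem.List.slice rest none (some h) ::
              PySem.List.slice rest (some h) none :: [middle] :: stack) out
termination_by stk _ => 2 * (stk.map (fun s => s.length * s.length)).sum + stk.length
decreasing_by
  · simp only [List.map_cons, List.sum_cons, List.length_cons]; omega
  · have hr := pvLenRest seg (by omega)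
    have ht := pvLenTakeHalf (PySem.List.slice seg none (some (PySem.Int.floordiv (seg.length : Int) 2)) ++
                PySem.List.slice seg (some (PySem.Int.floordiv (seg.length : Int) 2 + 1)) none)
    have hd := pvLenDropHalf (PySem.List.slice seg none (some (PySem.Int.floordiv (seg.length : Int) 2)) ++
                PySem.List.slice seg (some (PySem.Int.floordiv (seg.length : Int) 2 + 1)) none)
    exact pvMeasureLt _ _ seg _ _ (ht.trans (by rw [hr])) (hd.trans (by rw [hr])) (by omega)

def unsort_array_alt (arr : List Int) : List Int := pvLoop [arr] []

-- ===== PRECONDITION & SPEC =====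
def Spec_unsort_array (arr : List Int) (out : List Int) : Prop := out = unsort_array_alt arr
instance (arr : List Int) (out : List Int) : Decidable (Spec_unsort_array arr out) := by unfold Spec_unsort_array; infer_instance

-- ===== CLAIM (what is proved, stated in full; the proofs are below) =====
def Claim_equal_unsort_array : Prop := ∀ (arr : List Int), Dom_unsort_array arr → Spec_unsort_array arr (unsort_array arr)

-- ===== LEMMAS AND PROOFS =====
-- loop invariant: popping one segment appends exactly A's result for that segment
theorem pvLoop_append : ∀ (n : Nat) (seg : List Int), seg.length = n →
    ∀ (stack : List (List Int)) (out : List Int),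
      pvLoop (seg :: stack) out = pvLoop stack (out ++ unsort_array seg) := by
  intro n
  induction n using Nat.strong_induction_on with
  | _ n ih =>
    intro seg hlen stack out
    by_cases h : seg.length ≤ 1
    · rw [pvLoop, if_pos h, unsort_array, if_pos h]
    · rw [pvLoop, if_neg h]
      dsimp only
      have hr := pvLenRest seg (by omega)
      have ht := pvLenTakeHalf (PySem.List.slice seg none (some (PySem.Int.floordiv (seg.length : Int) 2)) ++
                  PySem.List.slice seg (some (PySem.Int.floordiv (seg.length : Int) 2 + 1)) none)
      have hd := pvLenDropHalf (PySem.List.slice seg none (some (PySem.Int.floordiv (seg.length : Int) 2)) ++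
                  PySem.List.slice seg (some (PySem.Int.floordiv (seg.length : Int) 2 + 1)) none)
      rw [ih _ (by omega) _ rfl]
      rw [ih _ (by omega) _ rfl]
      rw [ih 1 (by omega) _ rfl]
      conv_rhs => rw [unsort_array]
      rw [if_neg h]
      dsimp only
      rw [show unsort_array [PySem.List.pyGetD seg (PySem.Int.floordiv (seg.length : Int) 2) 0] =
            [PySem.List.pyGetD seg (PySem.Int.floordiv (seg.length : Int) 2) 0] by
          rw [unsort_array]; rfl]
      simp [List.append_assoc]

-- ===== VERDICT (by name: the statement is the Claim_ definition above) =====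
theorem unsort_array_spec : Claim_equal_unsort_array := by
  intro arr _
  unfold Spec_unsort_array unsort_array_alt
  rw [pvLoop_append arr.length arr rfl [] []]
  rw [pvLoop, List.nil_append]
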